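-- pv_equiv track=rewrite | github.com/BhupiSindhwani/python-problem-solving | misc/restore_array_from_adjacent_pairs.py | restore_array_from_adjacent_pairs
-- ===== SOURCE A (Python) =====
-- from collections import defaultdict
-- from typing import List
--
-- def restore_array_from_adjacent_pairs(adjacentPairs: List[List[int]]) -> List[int]:
--     """
--     There is an integer array nums that consists of n unique elements, but you have forgotten it.
--     However, you do remember every pair of adjacent elements in nums.
--
--     You are given a 2D integer array adjacentPairs of size n - 1 where each adjacentPairs[i] = [ui, vi] indicates that
--     the elements ui and vi are adjacent in nums.
--
--     It is guaranteed that every adjacent pair of elements nums[i] and nums[i+1] will exist in adjacentPairs,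
--     either as [nums[i], nums[i+1]] or [nums[i+1], nums[i]]. The pairs can appear in any order.
--
--     Return the original array nums. If there are multiple solutions, return any of them.
--
--     Args:
--         adjacentPairs: a 2D integer array of size n - 1 where adjacentPairs[i] = [ui, vi] indicates adjacent in nums
--
--     Returns:
--         the original array nums
--     """
--     result = []
--     visited = set()
--
--     # Build adjacency map
--     adj_map = defaultdict(set)
--
--     for p1, p2 in adjacentPairs:
--         adj_map[p1].add(p2)
--         adj_map[p2].add(p1)
--
--     # Identify a starting node
--     start_node = 0
--     for key, val in adj_map.items():
--         if len(val) == 1: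
--             start_node = key
--
--     # # Using recursive traversal
--     # def dfs(node: int) -> None:
--     #     if node not in visited:
--     #         visited.add(node)
--     #         result.append(node)
--     #         for neighbor in adj_map[node]:
--     #             dfs(neighbor)
--     #
--     # # Traverse the graph and append to result
--     # dfs(start_node)
--
--     # Using queue iteratively
--     queue = [start_node]
--     while queue:
--         curr_node = queue.pop()
--         if curr_node not in visited:
--             visited.add(curr_node)
--             result.append(curr_node)
--             for neighbor in adj_map[curr_node]:
--                 queue.append(neighbor)
--
--     # return the result
--     return result
-- ===== SOURCE B (Python) =====
-- from collections import defaultdict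
-- from typing import List
--
--
-- def restore_array_from_adjacent_pairs(adjacentPairs: List[List[int]]) -> List[int]:
--     # Same adjacency map and start selection as before, but the traversal keeps a
--     # previous-node pointer and walks the path directly: no visited set, no stack.
--     adj_map = defaultdict(set)
--     for p1, p2 in adjacentPairs:
--         adj_map[p1].add(p2)
--         adj_map[p2].add(p1)
--
--     start_node = 0
--     for key, val in adj_map.items():
--         if len(val) == 1:
--             start_node = key
--
--     result = [start_node]
--     prev, curr = None, start_node
--     # a path with m pairs needs at most m steps
--     for _ in range(len(adjacentPairs)):
--         nxt = None
--         for n in adj_map[curr]: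
--             if n != prev:
--                 nxt = n
--         if nxt is None:
--             break
--         result.append(nxt)
--         prev, curr = curr, nxt
--     return result
-- ===== Notes on version B (the rewrite author's own statement) =====
-- stated objective: simpler
-- what changed: The queue+visited-set stack traversal is replaced by a direct two-pointer path walk (prev/curr) that appends the unique neighbor different from the previous node, bounded by len(adjacentPairs) steps; no visited set and no stack are maintained.
-- outside the precondition, e.g. on restore_array_from_adjacent_pairs([[1, 2], [1, 3], [1, 4]]): A returns [4, 1, 3, 2], B returns [4, 1, 3]; on restore_array_from_adjacent_pairs([[0, 1], [1, 2], [2, 0]]): A returns [0, 2, 1], B returns [0, 2, 1, 0]; on restore_array_from_adjacent_pairs([[5, 5]]): A returns [5], B returns [5, 5]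
import Mathlib
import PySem

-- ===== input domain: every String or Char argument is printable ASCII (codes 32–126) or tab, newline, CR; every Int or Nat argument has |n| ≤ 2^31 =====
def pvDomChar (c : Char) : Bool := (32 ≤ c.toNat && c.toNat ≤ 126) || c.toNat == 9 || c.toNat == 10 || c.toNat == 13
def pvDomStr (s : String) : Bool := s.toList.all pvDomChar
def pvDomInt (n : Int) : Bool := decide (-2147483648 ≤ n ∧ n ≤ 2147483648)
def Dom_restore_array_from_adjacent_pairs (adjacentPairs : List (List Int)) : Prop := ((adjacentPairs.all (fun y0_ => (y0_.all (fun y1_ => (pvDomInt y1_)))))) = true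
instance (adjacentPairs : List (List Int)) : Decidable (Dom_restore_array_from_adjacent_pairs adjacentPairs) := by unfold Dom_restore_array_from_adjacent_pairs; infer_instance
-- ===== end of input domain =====

-- B replaces A's queue+visited-set stack traversal by a two-pointer (prev/curr) walk
-- along the path, bounded by len(adjacentPairs) steps: simpler state, same O(n) cost.


-- ===== PORT A =====
-- adj_map: defaultdict(set); adj_map[p1].add(p2) is Dict.modify with default ∅.
-- Pairs that are not 2-element lists make Python's unpacking raise (outside Pre_); the fold skips them.
def pvAdj (ps : List (List Int)) : PySem.Dict Int (PySem.Set Int) :=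
  ps.foldl (fun d p =>
    match p with
    | [p1, p2] =>
        (d.modify p1 PySem.Set.empty (fun s => PySem.Set.add s p2)).modify p2
          PySem.Set.empty (fun s => PySem.Set.add s p1)
    | _ => d) PySem.Dict.empty

-- start_node = 0; for key, val in adj_map.items(): if len(val) == 1: start_node = key
def pvStart (adj : PySem.Dict Int (PySem.Set Int)) : Int :=
  adj.items.foldl (fun acc kv => if PySem.Set.len kv.2 == 1 then kv.1 else acc) 0

-- while queue: curr = queue.pop(); if unvisited: visit, append, push neighbors.
-- Fuel only makes the while-loop total; 2*len+3 is never exhausted on Pre_ inputs (proved below).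
def pvLoopA (adj : PySem.Dict Int (PySem.Set Int)) :
    Nat → List Int → PySem.Set Int → List Int → List Int
  | 0, _, _, result => result
  | fuel + 1, queue, visited, result =>
    match PySem.List.pop? queue with
    | none => result
    | some (curr, rest) =>
      if PySem.Set.contains visited curr then
        pvLoopA adj fuel rest visited result
      else
        pvLoopA adj fuel (rest ++ adj.getD curr PySem.Set.empty)
          (PySem.Set.add visited curr) (result ++ [curr])

def restore_array_from_adjacent_pairs (adjacentPairs : List (List Int)) : List Int :=
  let adj := pvAdj adjacentPairs
  pvLoopA adj (2 * adjacentPairs.length + 3) [pvStart adj] PySem.Set.empty []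

-- ===== PORT B =====
-- for _ in range(len(adjacentPairs)): nxt = last neighbor of curr different from prev; break if none.
def pvLoopB (adj : PySem.Dict Int (PySem.Set Int)) :
    Nat → Option Int → Int → List Int → List Int
  | 0, _, _, result => result
  | fuel + 1, prev, curr, result =>
    match (adj.getD curr PySem.Set.empty).foldl
        (fun acc n => if some n ≠ prev then some n else acc) none with
    | none => result
    | some nxt => pvLoopB adj fuel (some curr) nxt (result ++ [nxt])

def restore_array_from_adjacent_pairs_alt (adjacentPairs : List (List Int)) : List Int :=
  let adj := pvAdj adjacentPairs
  pvLoopB adj adjacentPairs.length none (pvStart adj) [pvStart adj]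

-- ===== PRECONDITION & SPEC =====
-- the distinct neighbours of v in the pair list (input structure, not the ports' map)
def pvNbrs (ps : List (List Int)) (v : Int) : List Int :=
  PySem.List.dedup (ps.flatMap (fun p =>
    match p with
    | [a, b] => if a = v then [b] else if b = v then [a] else []
    | _ => []))

-- Pre_ excludes inputs that are not adjacent-pair lists of simple paths (a pair that is not a
-- 2-element list makes A's unpacking raise; a self-loop, a vertex of degree > 2, or a cycle
-- through 0 with no degree-1 vertex make A's answer an accident of Python's set-hash iteration
-- order, which no re-implementation can match).
def Pre_restore_array_from_adjacent_pairs (adjacentPairs : List (List Int)) : Prop :=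
  (∀ p ∈ adjacentPairs, p.length = 2 ∧ p.getD 0 0 ≠ p.getD 1 0) ∧
  (∀ v ∈ adjacentPairs.flatten, (pvNbrs adjacentPairs v).length ≤ 2) ∧
  ((∃ v ∈ adjacentPairs.flatten, (pvNbrs adjacentPairs v).length = 1) ∨
    (0 : Int) ∉ adjacentPairs.flatten)

instance (adjacentPairs : List (List Int)) :
    Decidable (Pre_restore_array_from_adjacent_pairs adjacentPairs) := by
  unfold Pre_restore_array_from_adjacent_pairs; infer_instance

def pvWitness_restore_array_from_adjacent_pairs : List (List Int) := [[1, 2], [2, 3]]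

def Spec_restore_array_from_adjacent_pairs (adjacentPairs : List (List Int)) (out : List Int) : Prop :=
  out = restore_array_from_adjacent_pairs_alt adjacentPairs

instance (adjacentPairs : List (List Int)) (out : List Int) :
    Decidable (Spec_restore_array_from_adjacent_pairs adjacentPairs out) := by
  unfold Spec_restore_array_from_adjacent_pairs; infer_instance

-- ===== CLAIM (what is proved, stated in full; the proofs are below) =====
def Claim_equal_restore_array_from_adjacent_pairs : Prop :=
  ∀ (adjacentPairs : List (List Int)), Dom_restore_array_from_adjacent_pairs adjacentPairs →
    Pre_restore_array_from_adjacent_pairs adjacentPairs →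
    Spec_restore_array_from_adjacent_pairs adjacentPairs
      (restore_array_from_adjacent_pairs adjacentPairs)

-- ===== LEMMAS AND PROOFS =====
set_option maxHeartbeats 1000000

-- neighbour list of v in the built adjacency map
def pvN (adj : PySem.Dict Int (PySem.Set Int)) (v : Int) : List Int :=
  adj.getD v PySem.Set.empty

-- every neighbour of each vertex of the suffix lies in the visited prefix or is the next vertex
def pvGood (adj : PySem.Dict Int (PySem.Set Int)) : List Int → List Int → Prop
  | _, [] => True
  | dn, r :: rs => (∀ x ∈ pvN adj r, x ∈ dn ∨ rs.head? = some x) ∧ pvGood adj (dn ++ [r]) rs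

def pvEdge (ps : List (List Int)) (v x : Int) : Prop :=
  ∃ p ∈ ps, p = [v, x] ∨ p = [x, v]

theorem pv_mem_adjFold (ps : List (List Int)) (d : PySem.Dict Int (PySem.Set Int))
    (hv : ∀ p ∈ ps, ∃ a b, p = [a, b]) (v x : Int) :
    x ∈ (ps.foldl (fun d p =>
      match p with
      | [p1, p2] =>
          (d.modify p1 PySem.Set.empty (fun s => PySem.Set.add s p2)).modify p2
            PySem.Set.empty (fun s => PySem.Set.add s p1)
      | _ => d) d).getD v PySem.Set.empty
      ↔ x ∈ d.getD v PySem.Set.empty ∨ pvEdge ps v x := by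
  induction ps generalizing d with
  | nil => simp [pvEdge]
  | cons p ps ih =>
    obtain ⟨a, b, rfl⟩ := hv p (by simp)
    rw [List.foldl_cons]
    have := ih ((d.modify a PySem.Set.empty (fun s => PySem.Set.add s b)).modify b
          PySem.Set.empty (fun s => PySem.Set.add s a)) (fun q hq => hv q (by simp [hq]))
    simp only at this ⊢
    rw [this]
    have hstep : x ∈ ((d.modify a PySem.Set.empty (fun s => PySem.Set.add s b)).modify b
          PySem.Set.empty (fun s => PySem.Set.add s a)).getD v PySem.Set.empty
        ↔ x ∈ d.getD v PySem.Set.empty ∨ (v = a ∧ x = b) ∨ (v = b ∧ x = a) := by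
      simp only [PySem.Dict.getD_modify]
      by_cases hba : b = a <;> by_cases hvb : v = b <;> by_cases hva : v = a <;>
        simp_all [PySem.Set.mem_add]
    rw [hstep]
    have hedge : pvEdge ([a, b] :: ps) v x ↔ ((v = a ∧ x = b) ∨ (v = b ∧ x = a)) ∨ pvEdge ps v x := by
      unfold pvEdge
      simp only [List.mem_cons]
      constructor
      · rintro ⟨q, hq | hq, hor⟩
        · subst hq
          rcases hor with h | h
          · injection h with h1 h2; injection h2 with h2 _
            exact Or.inl (Or.inl ⟨h1.symm, h2.symm⟩)
          · injection h with h1 h2; injection h2 with h2 _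
            exact Or.inl (Or.inr ⟨h2.symm, h1.symm⟩)
        · exact Or.inr ⟨q, hq, hor⟩
      · rintro ((⟨h1, h2⟩ | ⟨h1, h2⟩) | ⟨q, hq, hor⟩)
        · exact ⟨[a, b], Or.inl rfl, Or.inl (by rw [h1, h2])⟩
        · exact ⟨[a, b], Or.inl rfl, Or.inr (by rw [h1, h2])⟩
        · exact ⟨q, Or.inr hq, hor⟩
    rw [hedge]
    tauto

theorem pv_nodup_adjFold (ps : List (List Int)) (d : PySem.Dict Int (PySem.Set Int))
    (hd : ∀ v, (d.getD v PySem.Set.empty).Nodup) (v : Int) :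
    ((ps.foldl (fun d p =>
      match p with
      | [p1, p2] =>
          (d.modify p1 PySem.Set.empty (fun s => PySem.Set.add s p2)).modify p2
            PySem.Set.empty (fun s => PySem.Set.add s p1)
      | _ => d) d).getD v PySem.Set.empty).Nodup := by
  induction ps generalizing d with
  | nil => exact hd v
  | cons p ps ih =>
    rw [List.foldl_cons]
    refine ih _ (fun w => ?_)
    match p with
    | [] => exact hd w
    | [a] => exact hd w
    | a :: b :: c :: t => exact hd w
    | [a, b] =>
      simp only [PySem.Dict.getD_modify]
      by_cases hwb : w = b <;> by_cases hwa : w = a <;>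
        simp_all [PySem.Set.nodup_add]

theorem pv_mem_nbrs (ps : List (List Int)) (hv : ∀ p ∈ ps, ∃ a b, p = [a, b]) (v x : Int) :
    x ∈ pvNbrs ps v ↔ pvEdge ps v x := by
  unfold pvNbrs pvEdge
  rw [PySem.List.mem_dedup]
  rw [List.mem_flatMap]
  constructor
  · rintro ⟨p, hp, hx⟩
    obtain ⟨a, b, rfl⟩ := hv p hp
    refine ⟨[a, b], hp, ?_⟩
    simp only at hx
    by_cases hav : a = v <;> by_cases hbv : b = v <;> simp_all
  · rintro ⟨p, hp, hor⟩
    refine ⟨p, hp, ?_⟩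
    rcases hor with rfl | rfl <;> simp
    by_cases hxv : x = v <;> simp [hxv]

theorem pv_nodup_nbrs (ps : List (List Int)) (v : Int) : (pvNbrs ps v).Nodup :=
  PySem.List.nodup_dedup _

theorem pv_nodup_keys_adj (ps : List (List Int)) : (pvAdj ps).keys.Nodup := by
  unfold pvAdj
  generalize hD : PySem.Dict.empty = d0
  have h0 : (d0 : PySem.Dict Int (PySem.Set Int)).keys.Nodup := by
    rw [← hD]; exact PySem.Dict.nodup_keys_empty
  clear hD
  induction ps generalizing d0 with
  | nil => exact h0
  | cons p ps ih =>
    rw [List.foldl_cons]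
    refine ih _ ?_
    match p with
    | [] => exact h0
    | [a] => exact h0
    | a :: b :: c :: t => exact h0
    | [a, b] =>
      have step : ∀ (d : PySem.Dict Int (PySem.Set Int)) k f,
          d.keys.Nodup → (d.modify k PySem.Set.empty f).keys.Nodup := by
        intro d k f hk
        rw [PySem.Dict.keys_modify]
        by_cases hc : d.contains k = true
        · rwa [PySem.Dict.keys_insert_of_contains _ _ hc]
        · rw [PySem.Dict.keys_insert_of_not_contains _ _ (by simpa using hc)]
          refine List.Nodup.append hk (List.nodup_singleton _) ?_
          intro y hy hy'
          simp at hy'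
          subst hy'
          exact absurd ((PySem.Dict.contains_iff_mem_keys _ _).2 hy) (by simpa using hc)
      exact step _ _ _ (step _ _ _ h0)

theorem pv_mem_keys_adj (ps : List (List Int)) (hv : ∀ p ∈ ps, ∃ a b, p = [a, b]) (v : Int) :
    v ∈ (pvAdj ps).keys ↔ v ∈ ps.flatten := by
  unfold pvAdj
  have main : ∀ (ps : List (List Int)) (d : PySem.Dict Int (PySem.Set Int)),
      (∀ p ∈ ps, ∃ a b, p = [a, b]) →
      (v ∈ (ps.foldl (fun d p =>
        match p with
        | [p1, p2] =>
            (d.modify p1 PySem.Set.empty (fun s => PySem.Set.add s p2)).modify p2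
              PySem.Set.empty (fun s => PySem.Set.add s p1)
        | _ => d) d).keys ↔ v ∈ d.keys ∨ v ∈ ps.flatten) := by
    intro ps
    induction ps with
    | nil => intro d _; simp
    | cons p ps ih =>
      intro d hv'
      obtain ⟨a, b, rfl⟩ := hv' p (by simp)
      rw [List.foldl_cons]
      have hkeys : ∀ w, w ∈ (((d.modify a PySem.Set.empty (fun s => PySem.Set.add s b)).modify b
          PySem.Set.empty (fun s => PySem.Set.add s a))).keys ↔ w = a ∨ w = b ∨ w ∈ d.keys := by
        intro w
        simp only [PySem.Dict.keys_modify, PySem.Dict.mem_keys_insert]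
        tauto
      rw [ih _ (fun q hq => hv' q (by simp [hq]))]
      rw [hkeys v]
      simp only [List.flatten_cons, List.mem_append, List.mem_cons]
      simp only [List.not_mem_nil]
      tauto
  rw [main ps PySem.Dict.empty hv]
  simp [PySem.Dict.keys_empty]

-- an edge of the pair list, as an unordered pair
def pvSym (p : List Int) : Option (Sym2 Int) :=
  match p with
  | [a, b] => some s(a, b)
  | _ => none

theorem pv_edge_mem_sym (ps : List (List Int)) (v x : Int) (h : pvEdge ps v x) :
    s(v, x) ∈ ps.filterMap pvSym := by
  obtain ⟨p, hp, hor⟩ := h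
  rw [List.mem_filterMap]
  rcases hor with rfl | rfl
  · exact ⟨[v, x], hp, rfl⟩
  · exact ⟨[x, v], hp, by simp [pvSym, Sym2.eq_swap]⟩

theorem pv_walk_saturated (ps : List (List Int)) (adj : PySem.Dict Int (PySem.Set Int))
    (hedge : ∀ v x, x ∈ pvN adj v ↔ pvEdge ps v x)
    (res dn : List Int) (curr : Int)
    (hres : res = dn ++ [curr])
    (hch : res.IsChain (fun a b => b ∈ pvN adj a))
    (hnd : res.Nodup)
    (hlen : ps.length + 1 ≤ res.length) :
    ∀ x ∈ pvN adj curr, x ∈ dn := by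
  intro x hx
  classical
  set W : List (Sym2 Int) := (res.zip res.tail).map (fun q => s(q.1, q.2)) with hW
  have hlenres : res.length = dn.length + 1 := by rw [hres]; simp
  have htail : res.tail.length = res.length - 1 := by simp
  have hzlen : (res.zip res.tail).length = res.length - 1 := by
    simp [List.length_zip]
  have hWlen : W.length = res.length - 1 := by simp [hW, hzlen]
  -- W[t] = s(res[t], res[t+1])
  have hWget : ∀ (t : Nat) (ht : t < W.length),
      W[t] = s(res[t]'(by omega), res[t+1]'(by omega)) := by
    intro t ht
    have ht' : t < (res.zip res.tail).length := by simpa [hW] using ht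
    have ht2 : t < res.tail.length := by omega
    simp only [hW, List.getElem_map, List.getElem_zip]
    congr 1
    exact List.getElem_tail ht2
  -- W is a nodup list of edges of ps
  have hWE : ∀ e ∈ W, e ∈ ps.filterMap pvSym := by
    intro e he
    obtain ⟨t, ht, rfl⟩ := List.mem_iff_getElem.1 he
    rw [hWget t ht]
    apply pv_edge_mem_sym
    rw [← hedge]
    exact hch.getElem t (by omega)
  have hWnd : W.Nodup := by
    rw [List.nodup_iff_injective_getElem]
    rintro ⟨i, hi⟩ ⟨j, hj⟩ hij
    simp only [hWget i hi, hWget j hj, Sym2.eq_iff] at hij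
    have hinj : ∀ (i j : Nat) (hi : i < res.length) (hj : j < res.length),
        res[i] = res[j] → i = j := fun i j hi hj h => (List.Nodup.getElem_inj_iff hnd).1 h
    rcases hij with ⟨h1, h2⟩ | ⟨h1, h2⟩
    · have : i = j := hinj _ _ (by omega) (by omega) h1
      simpa using this
    · have e1 : i = j + 1 := hinj _ _ (by omega) (by omega) h1
      have e2 : i + 1 = j := hinj _ _ (by omega) (by omega) h2
      omega
  -- cardinalities force every pair edge to be a walk edge
  have hsub : W.toFinset ⊆ (ps.filterMap pvSym).toFinset := by
    intro e he
    rw [List.mem_toFinset] at he ⊢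
    exact hWE e he
  have hcard : (ps.filterMap pvSym).toFinset.card ≤ W.toFinset.card := by
    have h1 : W.toFinset.card = W.length := List.toFinset_card_of_nodup hWnd
    have h2 : (ps.filterMap pvSym).toFinset.card ≤ (ps.filterMap pvSym).length :=
      List.toFinset_card_le _
    have h3 : (ps.filterMap pvSym).length ≤ ps.length := List.length_filterMap_le _ _
    omega
  have hfeq : W.toFinset = (ps.filterMap pvSym).toFinset :=
    Finset.eq_of_subset_of_card_le hsub hcard
  -- the edge {curr, x} is a walk edge
  have hxW : s(curr, x) ∈ W := by
    have : s(curr, x) ∈ (ps.filterMap pvSym).toFinset := by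
      rw [List.mem_toFinset]
      exact pv_edge_mem_sym ps curr x ((hedge curr x).1 hx)
    rw [← hfeq, List.mem_toFinset] at this
    exact this
  obtain ⟨t, ht, hte⟩ := List.mem_iff_getElem.1 hxW
  rw [hWget t ht] at hte
  have hcurr : res[res.length - 1]'(by omega) = curr := by
    apply Option.some.inj
    rw [← List.getElem?_eq_getElem]
    rw [hres]
    have hidx : ((dn ++ [curr]).length - 1) = dn.length := by simp
    rw [hidx, List.getElem?_append_right (le_refl _)]
    simp
  have hinj : ∀ (i j : Nat) (hi : i < res.length) (hj : j < res.length),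
      res[i] = res[j] → i = j := fun i j hi hj h => (List.Nodup.getElem_inj_iff hnd).1 h
  rcases Sym2.eq_iff.1 hte with ⟨h1, h2⟩ | ⟨h1, h2⟩
  · -- curr = res[t] with t < len - 1 : impossible
    exfalso
    have : res.length - 1 = t := hinj _ _ (by omega) (by omega) (by rw [hcurr]; exact h1.symm)
    omega
  · -- curr = res[t+1]  ⇒  x = res[t], t < dn.length
    have ht1 : t + 1 = res.length - 1 :=
      hinj _ _ (by omega) (by omega) (by rw [hcurr]; exact h2)
    have htdn : t < dn.length := by omega
    have h3 : res[t]? = some x := by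
      rw [List.getElem?_eq_getElem (by omega)]
      exact congrArg some h1
    rw [hres, List.getElem?_append_left htdn] at h3
    exact List.mem_of_getElem? h3

theorem pv_loopA_good (adj : PySem.Dict Int (PySem.Set Int))
    (hdeg : ∀ v, (pvN adj v).length ≤ 2) :
    ∀ (fuel : Nat) (R dn queue res : List Int) (vis : PySem.Set Int),
    pvGood adj dn R →
    R.IsChain (fun a b => b ∈ pvN adj a) →
    (dn ++ R).Nodup →
    (∀ q ∈ queue, PySem.Set.contains vis q = true ∨ R.head? = some q) →
    (∀ r, R.head? = some r → r ∈ queue) →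
    (∀ x, PySem.Set.contains vis x = true ↔ x ∈ dn) →
    queue.length + 2 * R.length ≤ fuel →
    pvLoopA adj fuel queue vis res = res ++ R := by
  intro fuel
  induction fuel with
  | zero =>
    intro R dn queue res vis hg hch hnd hq hmem hvis hfuel
    have hq0 : queue = [] := by cases queue <;> simp_all
    have hR : R = [] := by cases R <;> simp_all
    subst hq0; subst hR; simp [pvLoopA]
  | succ fuel ih =>
    intro R dn queue res vis hg hch hnd hq hmem hvis hfuel
    have hmemvis : ∀ y, y ∈ vis ↔ y ∈ dn := fun y =>
      (PySem.Set.contains_iff vis y).symm.trans (hvis y)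
    rcases List.eq_nil_or_concat queue with rfl | ⟨rest, x, rfl⟩
    · have hR : R = [] := by
        cases R with
        | nil => rfl
        | cons r rs => exact absurd (hmem r rfl) (by simp)
      subst hR
      simp [pvLoopA, PySem.List.pop?]
    · rw [List.concat_eq_append]
      have hpop : PySem.List.pop? (rest ++ [x]) = some (x, rest) := PySem.List.pop?_last rest x
      by_cases hx : PySem.Set.contains vis x = true
      · have hx' : x ∈ vis := (PySem.Set.contains_iff vis x).1 hx
        have hstep : pvLoopA adj (fuel + 1) (rest ++ [x]) vis res = pvLoopA adj fuel rest vis res := by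
          simp [pvLoopA, hpop, hx']
        rw [hstep]
        refine ih R dn rest res vis hg hch hnd (fun q hq' => hq q (by simp [hq'])) ?_ hvis ?_
        · intro r hr
          have hrq := hmem r hr
          have hrR : r ∈ R := by
            cases R with
            | nil => simp at hr
            | cons a l => simp at hr; simp [hr]
          have hrdn : r ∉ dn := by
            intro hcontra
            exact (List.Nodup.disjoint hnd hcontra) hrR
          have : PySem.Set.contains vis r ≠ true := fun hc => hrdn ((hvis r).1 hc)
          have hrx : r ≠ x := fun h => this (h ▸ hx)
          simp at hrq
          rcases hrq with h | h
          · exact h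
          · exact absurd h hrx
        · simp at hfuel ⊢; omega
      · have hheadx : R.head? = some x := by
          rcases hq x (by simp) with h | h
          · exact absurd h hx
          · exact h
        cases R with
        | nil => simp at hheadx
        | cons r rs =>
        have hrx : x = r := by simpa using hheadx.symm
        cases hrx
        obtain ⟨hg1, hg2⟩ := hg
        have hx' : x ∉ vis := fun hmem' => hx ((PySem.Set.contains_iff vis x).2 hmem')
        have hstep : pvLoopA adj (fuel + 1) (rest ++ [x]) vis res =
            pvLoopA adj fuel (rest ++ pvN adj x) (PySem.Set.add vis x) (res ++ [x]) := by
          simp [pvLoopA, hpop, hx', pvN]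
        rw [hstep]
        have hvis' : ∀ y, PySem.Set.contains (PySem.Set.add vis x) y = true ↔ y ∈ dn ++ [x] := by
          intro y
          rw [PySem.Set.contains_iff, PySem.Set.mem_add]
          simp [hmemvis y]
        have hres := ih rs (dn ++ [x]) (rest ++ pvN adj x) (res ++ [x]) (PySem.Set.add vis x)
          hg2 hch.tail (by simpa using hnd)
          (by
            intro q hq'
            rcases List.mem_append.1 hq' with h | h
            · rcases hq q (by simp [h]) with h2 | h2
              · left
                rw [PySem.Set.contains_iff, PySem.Set.mem_add]
                exact Or.inl ((PySem.Set.contains_iff vis q).1 h2)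
              · left
                have hqx : q = x := by simpa using h2.symm
                rw [PySem.Set.contains_iff, PySem.Set.mem_add]
                exact Or.inr hqx
            · rcases hg1 q h with h2 | h2
              · left
                rw [PySem.Set.contains_iff, PySem.Set.mem_add]
                exact Or.inl ((hmemvis q).2 h2)
              · right; exact h2)
          (by
            intro r' hr'
            cases rs with
            | nil => simp at hr'
            | cons a l =>
              have ha : r' = a := by simpa using hr'.symm
              subst ha
              have : r' ∈ pvN adj x := (List.isChain_cons_cons.1 hch).1
              exact List.mem_append_right _ this)
          hvis'
          (by
            have h2 := hdeg x
            simp at hfuel ⊢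
            omega)
        rw [hres]
        simp

-- fold of "if some n ≠ prev then some n else acc"
theorem pv_fold_none (prev : Option Int) :
    ∀ (l : List Int) (acc : Option Int),
    l.foldl (fun acc n => if some n ≠ prev then some n else acc) acc = none →
    acc = none ∧ ∀ n ∈ l, some n = prev := by
  intro l
  induction l with
  | nil => intro acc h; exact ⟨h, by simp⟩
  | cons n l ih =>
    intro acc h
    rw [List.foldl_cons] at h
    obtain ⟨h1, h2⟩ := ih _ h
    by_cases hn : some n ≠ prev
    · rw [if_pos hn] at h1; exact absurd h1 (by simp)
    · rw [if_neg hn] at h1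
      push_neg at hn
      exact ⟨h1, by
        intro m hm
        rcases List.mem_cons.1 hm with rfl | hm'
        · exact hn
        · exact h2 m hm'⟩

theorem pv_fold_some (prev : Option Int) :
    ∀ (l : List Int) (acc : Option Int) (y : Int),
    l.foldl (fun acc n => if some n ≠ prev then some n else acc) acc = some y →
    (y ∈ l ∧ some y ≠ prev) ∨ acc = some y := by
  intro l
  induction l with
  | nil => intro acc y h; exact Or.inr h
  | cons n l ih =>
    intro acc y h
    rw [List.foldl_cons] at h
    rcases ih _ _ h with ⟨hy, hyp⟩ | hacc
    · exact Or.inl ⟨List.mem_cons_of_mem _ hy, hyp⟩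
    · by_cases hn : some n ≠ prev
      · rw [if_pos hn] at hacc
        have : n = y := by simpa using hacc
        subst this
        exact Or.inl ⟨List.mem_cons_self, hn⟩
      · rw [if_neg hn] at hacc
        exact Or.inr hacc

-- two members of a short nodup list
theorem pv_pair_mem (l : List Int) (a b : Int) (hnd : l.Nodup) (hlen : l.length ≤ 2)
    (ha : a ∈ l) (hb : b ∈ l) (hab : a ≠ b) : ∀ x ∈ l, x = a ∨ x = b := by
  match l with
  | [] => simp at ha
  | [c] => simp at ha hb; omega
  | [c, d] =>
    simp at ha hb
    intro x hx
    simp at hx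
    rcases ha with rfl | rfl <;> rcases hb with rfl | rfl <;> simp_all <;> tauto
  | c :: d :: e :: t => simp at hlen

theorem pv_single_mem (l : List Int) (a b : Int) (hlen : l.length ≤ 1)
    (ha : a ∈ l) (hb : b ∈ l) : a = b := by
  match l with
  | [] => simp at ha
  | [c] => simp at ha hb; omega
  | c :: d :: t => simp at hlen

theorem pv_three_mem (l : List Int) (a b c : Int) (ha : a ∈ l) (hb : b ∈ l) (hc : c ∈ l)
    (hab : a ≠ b) (hac : a ≠ c) (hbc : b ≠ c) : 3 ≤ l.length := by
  classical
  have hsub : ({a, b, c} : Finset Int) ⊆ l.toFinset := by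
    intro x hx
    simp at hx
    rcases hx with rfl | rfl | rfl <;> simpa using ‹_ ∈ l›
  have hcard : ({a, b, c} : Finset Int).card = 3 := by
    rw [Finset.card_insert_of_notMem (by simp [hab, hac]),
      Finset.card_insert_of_notMem (by simp [hbc])]
    simp
  calc 3 = ({a, b, c} : Finset Int).card := hcard.symm
    _ ≤ l.toFinset.card := Finset.card_le_card hsub
    _ ≤ l.length := l.toFinset_card_le

theorem pv_loopB_good (ps : List (List Int)) (adj : PySem.Dict Int (PySem.Set Int))
    (hedge : ∀ v x, x ∈ pvN adj v ↔ pvEdge ps v x)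
    (hirr : ∀ v, v ∉ pvN adj v)
    (hnodupN : ∀ v, (pvN adj v).Nodup)
    (hdeg : ∀ v, (pvN adj v).length ≤ 2) :
    ∀ (fuel : Nat) (dn res : List Int) (curr : Int),
    res = dn ++ [curr] →
    res.IsChain (fun a b => b ∈ pvN adj a) →
    res.Nodup →
    (∀ s, res.head? = some s → (pvN adj s).length ≤ 1) →
    ps.length ≤ (res.length - 1) + fuel →
    ∃ ext : List Int,
      pvLoopB adj fuel dn.getLast? curr res = res ++ ext ∧
      ext.length ≤ fuel ∧ (res ++ ext).Nodup ∧
      (res ++ ext).IsChain (fun a b => b ∈ pvN adj a) ∧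
      pvGood adj dn (curr :: ext) := by
  have hsym : ∀ v x, x ∈ pvN adj v → v ∈ pvN adj x := by
    intro v x h
    rw [hedge] at h ⊢
    obtain ⟨p, hp, hor⟩ := h
    exact ⟨p, hp, hor.symm⟩
  intro fuel
  induction fuel with
  | zero =>
    intro dn res curr hres hch hnd hstart hfuel
    refine ⟨[], by simp [pvLoopB], by simp, by simpa using hnd, by simpa using hch, ?_, ?_⟩
    · intro x hx
      exact Or.inl (pv_walk_saturated ps adj hedge res dn curr hres hch hnd
        (by have : 1 ≤ res.length := by rw [hres]; simp
            omega) x hx)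
    · trivial
  | succ fuel ih =>
    intro dn res curr hres hch hnd hstart hfuel
    rcases hfold : (adj.getD curr PySem.Set.empty).foldl
        (fun acc n => if some n ≠ dn.getLast? then some n else acc) none with _ | nxt
    · -- loop stops: every neighbour equals prev
      have hall := (pv_fold_none _ _ _ hfold).2
      refine ⟨[], by rw [pvLoopB, hfold]; simp, by simp, by simpa using hnd, by simpa using hch, ?_, ?_⟩
      · intro x hx
        have := hall x hx
        exact Or.inl (List.mem_of_getLast? this.symm)
      · trivial
    · -- one more step
      rcases pv_fold_some _ _ _ _ hfold with ⟨hnxtN, hnxtprev⟩ | habs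
      swap
      · exact absurd habs (by simp)
      have hcn : nxt ≠ curr := fun h => hirr curr (h ▸ hnxtN)
      -- nxt is fresh
      have hfresh : nxt ∉ res := by
        intro hmem
        rw [hres] at hmem
        rcases List.mem_append.1 hmem with hdn | hc
        swap
        · exact hcn (by simpa using hc)
        -- nxt ∈ dn: find its index
        obtain ⟨j, hj, hjv⟩ := List.mem_iff_getElem.1 hdn
        have hjlt : j < res.length := by rw [hres]; simp; omega
        have hjres : res[j]'hjlt = nxt := by
          have hq : res[j]? = some nxt := by
            rw [hres, List.getElem?_append_left hj, List.getElem?_eq_getElem hj, hjv]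
          exact Option.some.inj ((List.getElem?_eq_getElem hjlt).symm.trans hq)
        have hlenres : res.length = dn.length + 1 := by rw [hres]; simp
        have hinj : ∀ (i j : Nat) (hi : i < res.length) (hj : j < res.length),
            res[i] = res[j] → i = j := fun i j hi hj h => (List.Nodup.getElem_inj_iff hnd).1 h
        have hcurr : res[res.length - 1]'(by omega) = curr := by
          apply Option.some.inj
          rw [← List.getElem?_eq_getElem]
          rw [hres]
          have hidx : ((dn ++ [curr]).length - 1) = dn.length := by simp
          rw [hidx, List.getElem?_append_right (le_refl _)]
          simp
        have hchainget : ∀ (t : Nat) (ht : t + 1 < res.length),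
            res[t+1]'ht ∈ pvN adj (res[t]'(by omega)) := fun t ht => hch.getElem t ht
        rcases Nat.eq_or_lt_of_le (Nat.succ_le_of_lt hj) with hj1 | hj2
        · -- j = dn.length - 1 : nxt is exactly prev, contradiction
          have hq : dn[dn.length - 1]? = some nxt := by
            rw [show dn.length - 1 = j from by omega, List.getElem?_eq_getElem hj, hjv]
          refine absurd ?_ hnxtprev
          rw [List.getLast?_eq_getElem?, hq]
        · -- j + 1 < dn.length
          have hj2' : j + 1 < dn.length := hj2
          have hcm : curr ∈ pvN adj (res[j]'(by omega)) := by rw [hjres]; exact hsym _ _ hnxtN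
          rcases Nat.eq_zero_or_pos j with rfl | hjpos
          · -- j = 0 : start has degree ≤ 1
            have hhead : res.head? = some (res[0]'(by omega)) := by
              cases res with
              | nil => simp at hlenres
              | cons a l => simp
            have hd1 := hstart _ hhead
            have h1mem : res[1]'(by omega) ∈ pvN adj (res[0]'(by omega)) := hch.getElem 0 (by omega)
            have he : res[1]'(by omega) = curr := pv_single_mem _ _ _ hd1 h1mem hcm
            have : (1 : Nat) = res.length - 1 :=
              hinj _ _ (by omega) (by omega) (by rw [hcurr]; exact he)
            omega
          · -- 0 < j : res[j] would have three distinct neighbours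
            have hm1 : res[j-1]'(by omega) ∈ pvN adj (res[j]'(by omega)) := by
              apply hsym
              have h' := hch.getElem (j-1) (show j - 1 + 1 < res.length by omega)
              have hidx : j - 1 + 1 = j := by omega
              convert h' using 2 <;> omega
            have hp1 : res[j+1]'(by omega) ∈ pvN adj (res[j]'(by omega)) := hch.getElem j (by omega)
            have hd3 : 3 ≤ (pvN adj (res[j]'(by omega))).length := by
              apply pv_three_mem _ _ _ _ hm1 hp1 hcm
              · intro h
                have : j - 1 = j + 1 := hinj _ _ (by omega) (by omega) h
                omega
              · intro h
                have : j - 1 = res.length - 1 := hinj _ _ (by omega) (by omega) (by rw [hcurr]; exact h)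
                omega
              · intro h
                have : j + 1 = res.length - 1 := hinj _ _ (by omega) (by omega) (by rw [hcurr]; exact h)
                omega
            have := hdeg (res[j]'(by omega))
            omega
      -- invariants for the recursive call
      have hch' : (res ++ [nxt]).IsChain (fun a b => b ∈ pvN adj a) := by
        refine hch.append (by simp) ?_
        intro x hx y hy
        have hxc : x = curr := by
          rw [hres, List.getLast?_append] at hx
          simp at hx
          exact hx.symm
        have hyn : y = nxt := by simpa using hy.symm
        subst hxc; subst hyn
        exact hnxtN
      have hnd' : (res ++ [nxt]).Nodup := by
        refine List.Nodup.append hnd (List.nodup_singleton _) ?_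
        intro y hy hy'
        simp at hy'
        subst hy'
        exact hfresh hy
      have hstart' : ∀ s, (res ++ [nxt]).head? = some s → (pvN adj s).length ≤ 1 := by
        intro s hs
        apply hstart
        cases res with
        | nil => exact absurd hres.symm (by simp)
        | cons a l => simpa using hs
      have hlast' : res.getLast? = some curr := by
        rw [hres, List.getLast?_append]
        simp
      obtain ⟨ext, hrun, hextlen, hndE, hchE, hgoodE⟩ :=
        ih res (res ++ [nxt]) nxt rfl hch' hnd' hstart'
          (by
            have h1 : (res ++ [nxt]).length = res.length + 1 := by simp
            have h2 : 1 ≤ res.length := by rw [hres]; simp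
            omega)
      refine ⟨nxt :: ext, ?_, by simpa using Nat.succ_le_succ hextlen, ?_, ?_, ?_⟩
      · show pvLoopB adj (fuel + 1) dn.getLast? curr res = _
        rw [pvLoopB, hfold]
        show pvLoopB adj fuel (some curr) nxt (res ++ [nxt]) = res ++ nxt :: ext
        rw [← hlast', hrun]
        simp
      · simpa using hndE
      · simpa using hchE
      · -- pvGood dn (curr :: nxt :: ext)
        refine ⟨?_, by simpa [hres] using hgoodE⟩
        intro x hx
        rcases List.eq_nil_or_concat dn with rfl | ⟨dn', p, rfl⟩
        · -- dn = [] : curr is the start, degree ≤ 1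
          have hhead : res.head? = some curr := by rw [hres]; simp
          have hd1 := hstart _ hhead
          right
          simp only [List.head?_cons]
          exact congrArg some (pv_single_mem _ _ _ hd1 hx hnxtN).symm
        · -- prev = some p : neighbours of curr are exactly {p, nxt}
          rw [List.concat_eq_append] at *
          have hplast : (dn' ++ [p]).getLast? = some p := by
            rw [List.getLast?_append]; simp
          have hpn : p ≠ nxt := by
            intro h
            apply hnxtprev
            rw [hplast, h]
          have hpmem : p ∈ pvN adj curr := by
            apply hsym
            have hre : res = (dn' ++ [p]) ++ [curr] := by rw [hres]
            rw [hre] at hch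
            have h3 := (List.isChain_append.1 hch).2.2
            exact h3 p (by simp [hplast]) curr rfl
          rcases pv_pair_mem (pvN adj curr) p nxt (hnodupN curr) (hdeg curr) hpmem hnxtN hpn
              x hx with rfl | rfl
          · left; simp
          · right; simp


-- the start-selection fold returns the initial value or the key of a hit item
theorem pv_start_fold (items : List (Int × PySem.Set Int)) (acc : Int) :
    (items.foldl (fun acc kv => if PySem.Set.len kv.2 == 1 then kv.1 else acc) acc = acc ∧
      ∀ kv ∈ items, ¬ ((PySem.Set.len kv.2 == 1) = true)) ∨
    (∃ kv ∈ items, ((PySem.Set.len kv.2 == 1) = true) ∧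
      items.foldl (fun acc kv => if PySem.Set.len kv.2 == 1 then kv.1 else acc) acc = kv.1) := by
  induction items generalizing acc with
  | nil => exact Or.inl ⟨rfl, by simp⟩
  | cons kv items ih =>
    by_cases hc : (PySem.Set.len kv.2 == 1) = true
    · rcases ih kv.1 with ⟨h1, _⟩ | ⟨kv', hkv', hc', heq⟩
      · exact Or.inr ⟨kv, List.mem_cons_self, hc, by rw [List.foldl_cons, if_pos hc]; exact h1⟩
      · exact Or.inr ⟨kv', List.mem_cons_of_mem _ hkv', hc',
          by rw [List.foldl_cons, if_pos hc]; exact heq⟩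
    · rcases ih acc with ⟨h1, h2⟩ | ⟨kv', hkv', hc', heq⟩
      · refine Or.inl ⟨by rw [List.foldl_cons, if_neg hc]; exact h1, ?_⟩
        intro q hq
        rcases List.mem_cons.1 hq with rfl | hq'
        · exact hc
        · exact h2 q hq'
      · exact Or.inr ⟨kv', List.mem_cons_of_mem _ hkv', hc',
          by rw [List.foldl_cons, if_neg hc]; exact heq⟩

-- a vertex of an edge occurs in the flattened pair list
theorem pv_edge_vertex (ps : List (List Int)) (v x : Int) (h : pvEdge ps v x) :
    v ∈ ps.flatten := by
  obtain ⟨p, hp, hor⟩ := h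
  exact List.mem_flatten.2 ⟨p, hp, by rcases hor with rfl | rfl <;> simp⟩

theorem pv_mem_pvN (ps : List (List Int)) (hv : ∀ p ∈ ps, ∃ a b, p = [a, b]) (v x : Int) :
    x ∈ pvN (pvAdj ps) v ↔ pvEdge ps v x := by
  unfold pvN pvAdj
  rw [pv_mem_adjFold ps PySem.Dict.empty hv v x]
  simp [PySem.Dict.getD_empty, PySem.Set.empty]

theorem pv_not_vertex (ps : List (List Int)) (hv : ∀ p ∈ ps, ∃ a b, p = [a, b]) (v : Int)
    (h : v ∉ ps.flatten) : pvN (pvAdj ps) v = [] := by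
  cases h' : pvN (pvAdj ps) v with
  | nil => rfl
  | cons a l =>
    exfalso
    have ha : a ∈ pvN (pvAdj ps) v := by rw [h']; exact List.mem_cons_self
    exact h (pv_edge_vertex ps v a ((pv_mem_pvN ps hv v a).1 ha))

-- ===== VERDICT (by name: the statement is the Claim_ definition above) =====
theorem restore_array_from_adjacent_pairs_spec :
    Claim_equal_restore_array_from_adjacent_pairs := by
  unfold Claim_equal_restore_array_from_adjacent_pairs
  intro ps _hdom hpre
  unfold Spec_restore_array_from_adjacent_pairs
  obtain ⟨hvalid, hdegpre, hstartpre⟩ := hpre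
  have hv : ∀ p ∈ ps, ∃ a b, p = [a, b] ∧ a ≠ b := by
    intro p hp
    obtain ⟨hl, hne⟩ := hvalid p hp
    match p, hl with
    | [a, b], _ => exact ⟨a, b, rfl, by simpa using hne⟩
  have hv' : ∀ p ∈ ps, ∃ a b, p = [a, b] := fun p hp =>
    (hv p hp).imp (fun a h => h.imp (fun b h2 => h2.1))
  have hedge : ∀ v x, x ∈ pvN (pvAdj ps) v ↔ pvEdge ps v x := pv_mem_pvN ps hv'
  have hirr : ∀ v, v ∉ pvN (pvAdj ps) v := by
    intro v hvv
    rw [hedge] at hvv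
    obtain ⟨p, hp, hor⟩ := hvv
    obtain ⟨a, b, rfl, hne⟩ := hv p hp
    rcases hor with h | h <;>
      · injection h with h1 h2
        injection h2 with h2 _
        exact hne (h1.trans h2.symm)
  have hnodupN : ∀ v, (pvN (pvAdj ps) v).Nodup := by
    intro v
    unfold pvN pvAdj
    exact pv_nodup_adjFold ps PySem.Dict.empty
      (fun w => by simp [PySem.Dict.getD_empty, PySem.Set.empty]) v
  have hlen_eq : ∀ v, (pvN (pvAdj ps) v).length = (pvNbrs ps v).length := by
    intro v
    refine List.Perm.length_eq ?_
    rw [List.perm_ext_iff_of_nodup (hnodupN v) (pv_nodup_nbrs ps v)]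
    intro a
    rw [hedge, pv_mem_nbrs ps hv']
  have hdegadj : ∀ v, (pvN (pvAdj ps) v).length ≤ 2 := by
    intro v
    by_cases hvmem : v ∈ ps.flatten
    · rw [hlen_eq]; exact hdegpre v hvmem
    · rw [pv_not_vertex ps hv' v hvmem]; simp
  show pvLoopA (pvAdj ps) (2 * ps.length + 3) [pvStart (pvAdj ps)] PySem.Set.empty [] =
    pvLoopB (pvAdj ps) ps.length none (pvStart (pvAdj ps)) [pvStart (pvAdj ps)]
  have hsdef : pvStart (pvAdj ps) =
      (pvAdj ps).items.foldl (fun acc kv => if PySem.Set.len kv.2 == 1 then kv.1 else acc) 0 := rfl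
  have hvisempty : ∀ x : Int, PySem.Set.contains PySem.Set.empty x = true ↔ x ∈ ([] : List Int) := by
    intro x
    rw [PySem.Set.contains_iff]
    simp [PySem.Set.empty]
  rcases pv_start_fold (pvAdj ps).items 0 with ⟨hzero, hnone⟩ | ⟨kv, hkv, hcond, heq⟩
  · -- no degree-1 key: start = 0, and 0 is not a vertex
    have hs0 : pvStart (pvAdj ps) = 0 := by rw [hsdef, hzero]
    have h0 : (0 : Int) ∉ ps.flatten := by
      rcases hstartpre with ⟨v, hvmem, hdeg1⟩ | h0
      · exfalso
        have hlen1 : (pvN (pvAdj ps) v).length = 1 := by rw [hlen_eq]; exact hdeg1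
        have hk : v ∈ (pvAdj ps).keys := (pv_mem_keys_adj ps hv' v).2 hvmem
        obtain ⟨⟨v', w⟩, hw, hv'e⟩ := List.mem_map.1 hk
        cases hv'e
        have hgd : (pvAdj ps).getD v' PySem.Set.empty = w :=
          PySem.Dict.getD_of_mem_items _ hw (pv_nodup_keys_adj ps) _
        apply hnone (v', w) hw
        have hwlen : w.length = 1 := by
          have : pvN (pvAdj ps) v' = w := hgd
          rw [← this]
          exact hlen1
        rw [PySem.Set.len_eq]
        simp [hwlen]
      · exact h0
    have hN0 : pvN (pvAdj ps) 0 = [] := pv_not_vertex ps hv' 0 h0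
    rw [hs0]
    have hA : pvLoopA (pvAdj ps) (2 * ps.length + 3) [0] PySem.Set.empty [] = [] ++ [0] := by
      apply pv_loopA_good (pvAdj ps) hdegadj (2 * ps.length + 3) [0] [] [0] [] PySem.Set.empty
      · exact ⟨by simp [hN0], trivial⟩
      · simp
      · simp
      · intro q hq; right; simp at hq; simp [hq]
      · intro r hr; simp at hr; simp [hr]
      · exact hvisempty
      · simp
    have hB : pvLoopB (pvAdj ps) ps.length none 0 [0] = [0] := by
      cases hm : ps.length with
      | zero => rfl
      | succ k =>
        rw [pvLoopB]
        have : (pvAdj ps).getD 0 PySem.Set.empty = [] := hN0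
        rw [this]
        rfl
    rw [hA, hB]
    rfl
  · -- a degree-1 item exists: start is its key
    obtain ⟨k, w⟩ := kv
    have hs1 : pvStart (pvAdj ps) = k := by rw [hsdef, heq]
    have hgd : (pvAdj ps).getD k PySem.Set.empty = w :=
      PySem.Dict.getD_of_mem_items _ hkv (pv_nodup_keys_adj ps) _
    have hslen : (pvN (pvAdj ps) k).length = 1 := by
      have hwk : pvN (pvAdj ps) k = w := hgd
      rw [hwk]
      have := hcond
      rw [PySem.Set.len_eq] at this
      simpa using this
    rw [hs1]
    obtain ⟨ext, hrun, hextlen, hndT, hchT, hgoodT⟩ :=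
      pv_loopB_good ps (pvAdj ps) hedge hirr hnodupN hdegadj ps.length [] [k] k rfl
        (by simp) (by simp)
        (by intro t ht; simp at ht; rw [← ht]; omega)
        (by simp)
    have hA : pvLoopA (pvAdj ps) (2 * ps.length + 3) [k] PySem.Set.empty [] = [] ++ (k :: ext) := by
      apply pv_loopA_good (pvAdj ps) hdegadj (2 * ps.length + 3) (k :: ext) [] [k] [] PySem.Set.empty
      · exact hgoodT
      · simpa using hchT
      · simpa using hndT
      · intro q hq; right; simp at hq; simp [hq]
      · intro r hr; simp at hr; simp [hr]
      · exact hvisempty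
      · simp
        omega
    have hrun' : pvLoopB (pvAdj ps) ps.length none k [k] = [k] ++ ext := hrun
    rw [hA, hrun']
    simp
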